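-- pv_equiv track=rewrite | github.com/CNIC-Proteomics/DIANN-PDMTable | PDMTableMaker_DIA.py | get_misscleavages
-- ===== SOURCE A (Python) =====
-- def get_misscleavages(string):
--     """
--     Get the number of missed cleavages in a peptide sequence.
--     KK, KR, KP, RR, RK and RP are not considered as missed cleavages.
--     """
--     #keep only capital letters, deleting lower cases and special characters
--     seq = ''.join([c for c in string if c.isupper()])
--     count = 0
--     #iterate through the sequence
--     for i, aa in enumerate(seq):
--         if aa in ('K', 'R'):
--             if i < len(seq) - 1 and seq[i+1] not in ('K', 'R', 'P'):
--                 count += 1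
--     return count
-- ===== SOURCE B (Python) =====
-- import re
--
-- def get_misscleavages(string):
--     """
--     Get the number of missed cleavages in a peptide sequence.
--     KK, KR, KP, RR, RK and RP are not considered as missed cleavages.
--     """
--     # keep only capital letters, then count cleavage sites with a regex:
--     # a K or R immediately followed by a residue other than K, R or P.
--     seq = ''.join(c for c in string if c.isupper())
--     return len(re.findall('[KR][^KRP]', seq))
-- ===== Notes on version B (the rewrite author's own statement) =====
-- stated objective: idiomatic
-- what changed: Replaces the index-based enumerate loop with a bounds check and seq[i+1] lookups by a single regex findall of the pattern [KR][^KRP] over the uppercase-filtered sequence (non-overlapping left-to-right matching).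
import Mathlib
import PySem

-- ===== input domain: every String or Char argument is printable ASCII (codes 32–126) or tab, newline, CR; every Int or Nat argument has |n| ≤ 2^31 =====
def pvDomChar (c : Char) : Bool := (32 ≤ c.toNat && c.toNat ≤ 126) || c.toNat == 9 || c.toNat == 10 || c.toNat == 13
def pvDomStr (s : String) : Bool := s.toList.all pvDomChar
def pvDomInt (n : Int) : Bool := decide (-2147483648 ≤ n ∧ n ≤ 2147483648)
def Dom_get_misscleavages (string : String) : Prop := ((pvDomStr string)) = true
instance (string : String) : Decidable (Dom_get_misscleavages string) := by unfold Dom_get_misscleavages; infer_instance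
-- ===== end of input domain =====

-- B replaces A's index-based loop (with seq[i+1] lookups) by a non-overlapping
-- left-to-right two-character pattern scan (regex [KR][^KRP]); idiomatic, same cost.


-- ===== PORT A =====
-- seq[i+1] is ported with pyGetD: the guard i < len(seq) - 1 (evaluated first, as
-- Python's `and` short-circuits) ensures the index is in range, so the default is never used.
def get_misscleavages (string : String) : Int :=
  let seq := string.toList.filter (fun c => PySem.Chars.isupper c)
  (PySem.List.enumerate seq).foldl
    (fun count iaa =>
      if iaa.2 = 'K' ∨ iaa.2 = 'R' then
        if iaa.1 < (seq.length : Int) - 1 ∧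
            ¬(PySem.List.pyGetD seq (iaa.1 + 1) ' ' = 'K' ∨
              PySem.List.pyGetD seq (iaa.1 + 1) ' ' = 'R' ∨
              PySem.List.pyGetD seq (iaa.1 + 1) ' ' = 'P') then
          count + 1
        else count
      else count) 0

-- ===== PORT B =====
-- Hand port of re.findall('[KR][^KRP]', seq): exact, because the pattern is two
-- fixed character classes, so the regex engine's non-overlapping left-to-right scan
-- is: at each position, if the next two characters match, count and skip both,
-- otherwise advance by one.
def pvRegexScan : List Char → Int
  | c1 :: c2 :: rest =>
      if (c1 = 'K' ∨ c1 = 'R') ∧ ¬(c2 = 'K' ∨ c2 = 'R' ∨ c2 = 'P') then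
        1 + pvRegexScan rest
      else
        pvRegexScan (c2 :: rest)
  | _ => 0

def get_misscleavages_alt (string : String) : Int :=
  pvRegexScan (string.toList.filter (fun c => PySem.Chars.isupper c))

-- ===== PRECONDITION & SPEC =====
def Spec_get_misscleavages (string : String) (out : Int) : Prop := out = get_misscleavages_alt string
instance (string : String) (out : Int) : Decidable (Spec_get_misscleavages string out) := by unfold Spec_get_misscleavages; infer_instance

-- ===== CLAIM (what is proved, stated in full; the proofs are below) =====
def Claim_equal_get_misscleavages : Prop := ∀ (string : String), Dom_get_misscleavages string → Spec_get_misscleavages string (get_misscleavages string)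

-- ===== LEMMAS AND PROOFS =====

-- Adjacent-pair count: the common middle form both ports are reduced to.
def pvPairCount : List Char → Int
  | a :: b :: rest =>
      (if (a = 'K' ∨ a = 'R') ∧ ¬(b = 'K' ∨ b = 'R' ∨ b = 'P') then (1 : Int) else 0)
        + pvPairCount (b :: rest)
  | _ => 0

-- A's fold over enumerate (l.drop k) with indexing into l equals pvPairCount of the suffix.
lemma pvFoldA_eq_pairCount (l : List Char) (s : List Char) (k : Nat) (hk : l.drop k = s)
    (acc : Int) :
    (PySem.List.enumerate s (k : Int)).foldl
      (fun count iaa =>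
        if iaa.2 = 'K' ∨ iaa.2 = 'R' then
          if iaa.1 < (l.length : Int) - 1 ∧
              ¬(PySem.List.pyGetD l (iaa.1 + 1) ' ' = 'K' ∨
                PySem.List.pyGetD l (iaa.1 + 1) ' ' = 'R' ∨
                PySem.List.pyGetD l (iaa.1 + 1) ' ' = 'P') then
            count + 1
          else count
        else count) acc
      = acc + pvPairCount s := by
  induction s generalizing k acc with
  | nil => simp [PySem.List.enumerate_nil, pvPairCount]
  | cons a s' ih =>
    have hk' : l.drop (k + 1) = s' := by
      have h1 : l.drop (k + 1) = (l.drop k).drop 1 := by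
        rw [List.drop_drop]
      simp [h1, hk]
    have hlen : l.length = k + 1 + s'.length := by
      have h2 : (l.drop k).length = l.length - k := List.length_drop ..
      have h3 : k ≤ l.length := by
        by_contra h
        have : l.drop k = [] := List.drop_eq_nil_of_le (by omega)
        rw [hk] at this; cases this
      rw [hk] at h2; simp at h2; omega
    rw [PySem.List.enumerate_cons, List.foldl_cons]
    have hcast : (k : Int) + 1 = ((k + 1 : Nat) : Int) := by push_cast; ring
    rw [hcast, ih (k + 1) hk' _]
    cases s' with
    | nil =>
      have hguard : ¬ ((k : Int) < (l.length : Int) - 1) := by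
        simp [hlen]
      simp [pvPairCount, hguard]
    | cons b rest =>
      have hb : PySem.List.pyGetD l (((k + 1 : Nat) : Int)) ' ' = b := by
        rw [PySem.List.pyGetD_natCast]
        have : l[k+1]? = some b := by
          have : (l.drop (k+1))[0]? = some b := by rw [hk']; rfl
          simpa [List.getElem?_drop] using this
        simp [List.getD, this]
      have hguard : (k : Int) < (l.length : Int) - 1 := by
        simp [hlen]; omega
      rw [hb]
      simp only [pvPairCount]
      have hif : (if a = 'K' ∨ a = 'R' then
            (if (k : Int) < (l.length : Int) - 1 ∧ ¬(b = 'K' ∨ b = 'R' ∨ b = 'P') then acc + 1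
             else acc)
          else acc)
          = acc + (if (a = 'K' ∨ a = 'R') ∧ ¬(b = 'K' ∨ b = 'R' ∨ b = 'P') then (1 : Int) else 0) := by
        by_cases h1 : a = 'K' ∨ a = 'R'
        · by_cases h2 : b = 'K' ∨ b = 'R' ∨ b = 'P'
          · simp [h1, h2]
          · simp [h1, h2, hguard]
        · simp [h1]
      rw [hif]
      ring

lemma pvPair_eq_regex (l : List Char) : pvPairCount l = pvRegexScan l := by
  induction l using pvRegexScan.induct with
  | case1 c1 c2 rest hcond ih =>
    have hc2 : ¬ (c2 = 'K' ∨ c2 = 'R') := by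
      rcases hcond with ⟨_, h2⟩
      intro h; rcases h with h | h <;> simp [h] at h2
    have htail : pvPairCount (c2 :: rest) = pvPairCount rest := by
      cases rest with
      | nil => simp [pvPairCount]
      | cons c3 r => simp [pvPairCount, hc2]
    simp only [pvPairCount, pvRegexScan, if_pos hcond, htail, ih]
  | case2 c1 c2 rest hcond ih =>
    simp only [pvPairCount, pvRegexScan, if_neg hcond]
    cases rest with
    | nil => simp [pvPairCount, pvRegexScan] at ih ⊢
    | cons c3 r => simpa [pvPairCount] using ih
  | case3 x h =>
    match x, h with
    | [], _ => rfl
    | [c], _ => rfl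
    | c1 :: c2 :: rest, h => exact absurd rfl (h c1 c2 rest)

-- ===== VERDICT (by name: the statement is the Claim_ definition above) =====
theorem get_misscleavages_spec : Claim_equal_get_misscleavages := by
  intro s _
  unfold Spec_get_misscleavages get_misscleavages get_misscleavages_alt
  have h := pvFoldA_eq_pairCount (s.toList.filter (fun c => PySem.Chars.isupper c))
      (s.toList.filter (fun c => PySem.Chars.isupper c)) 0 (by simp) 0
  simpa [pvPair_eq_regex] using h
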